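-- pv_equiv track=rewrite | github.com/TheDrimo/Feu | feu06.py | stop_errance
-- ===== SOURCE A (Python) =====
-- def stop_errance(chemin):
-- 	chemin_plus_court = []
-- 	curseur = 0
-- 	while curseur < len(chemin) :
-- 		chemin_plus_court.append(chemin[curseur])
-- 		curseur += 1
-- 		for i in range(curseur+1, len(chemin)):
-- 			if chemin[i] == chemin[curseur] :
-- 				curseur = i
-- 	return chemin_plus_court
-- ===== SOURCE B (Python) =====
-- def stop_errance(chemin):
--     # Precompute the last index of each value once, then jump in O(1) per step.
--     last = {}
--     for i, v in enumerate(chemin):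
--         last[v] = i
--     chemin_plus_court = []
--     p = 0
--     n = len(chemin)
--     while p < n:
--         chemin_plus_court.append(chemin[p])
--         p += 1
--         if p < n:
--             p = last[chemin[p]]
--     return chemin_plus_court
-- ===== Notes on version B (the rewrite author's own statement) =====
-- stated objective: faster
-- what changed: Replaced A's inner rescan of the whole suffix at every step by a dict of each value's last index built once, so each jump is an O(1) lookup.
import Mathlib
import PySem

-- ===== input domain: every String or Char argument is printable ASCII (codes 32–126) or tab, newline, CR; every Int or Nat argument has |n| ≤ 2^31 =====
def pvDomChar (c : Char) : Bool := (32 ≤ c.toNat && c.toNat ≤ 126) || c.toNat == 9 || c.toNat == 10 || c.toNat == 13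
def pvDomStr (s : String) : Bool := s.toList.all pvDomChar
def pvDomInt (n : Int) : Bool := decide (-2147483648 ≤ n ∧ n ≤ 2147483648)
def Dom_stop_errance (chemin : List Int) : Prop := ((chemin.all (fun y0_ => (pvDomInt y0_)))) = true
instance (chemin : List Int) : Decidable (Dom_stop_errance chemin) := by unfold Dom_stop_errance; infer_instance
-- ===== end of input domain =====

-- B builds a dict of each value's last index once and jumps by O(1) lookup,
-- replacing A's rescan of the suffix at every step (asymptotic speed-up measured by the check).

-- ===== PORT A =====
-- inner 'for i in range(curseur+1, len(chemin)): if chemin[i] == chemin[curseur]: curseur = i'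
-- (indices are always in range here, so pyGetD is exact)
def pvInnerA (chemin : List Int) (c : Int) : Int :=
  (PySem.List.pyRange (c + 1) chemin.length 1).foldl
    (fun cur i => if PySem.List.pyGetD chemin i 0 = PySem.List.pyGetD chemin cur 0 then i else cur) c

-- the while loop, fuel-guarded: curseur grows by ≥ 1 each pass, so fuel len+1 is never exhausted
def pvLoopA (chemin : List Int) : Nat → Int → List Int → List Int
  | 0, _, acc => acc
  | fuel + 1, curseur, acc =>
    if curseur < (chemin.length : Int) then
      pvLoopA chemin fuel (pvInnerA chemin (curseur + 1))
        (acc ++ [PySem.List.pyGetD chemin curseur 0])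
    else acc

def stop_errance (chemin : List Int) : List Int :=
  pvLoopA chemin (chemin.length + 1) 0 []

-- ===== PORT B =====
-- last = {}; for i, v in enumerate(chemin): last[v] = i
def pvLastDict (chemin : List Int) : PySem.Dict Int Int :=
  (PySem.List.enumerate chemin 0).foldl (fun d p => d.insert p.2 p.1) PySem.Dict.empty

-- the while loop of Source B, fuel-guarded as above (the key chemin[p] is always present, so getD is exact)
def pvLoopB (chemin : List Int) (last : PySem.Dict Int Int) : Nat → Int → List Int → List Int
  | 0, _, res => res
  | fuel + 1, p, res =>
    if p < (chemin.length : Int) then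
      let res' := res ++ [PySem.List.pyGetD chemin p 0]
      let p1 := p + 1
      let p2 := if p1 < (chemin.length : Int) then last.getD (PySem.List.pyGetD chemin p1 0) 0 else p1
      pvLoopB chemin last fuel p2 res'
    else res

def stop_errance_alt (chemin : List Int) : List Int :=
  pvLoopB chemin (pvLastDict chemin) (chemin.length + 1) 0 []

-- ===== PRECONDITION & SPEC =====
def Spec_stop_errance (chemin : List Int) (out : List Int) : Prop := out = stop_errance_alt chemin
instance (chemin : List Int) (out : List Int) : Decidable (Spec_stop_errance chemin out) := by unfold Spec_stop_errance; infer_instance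

-- ===== CLAIM (what is proved, stated in full; the proofs are below) =====
def Claim_equal_stop_errance : Prop := ∀ (chemin : List Int), Dom_stop_errance chemin → Spec_stop_errance chemin (stop_errance chemin)

-- ===== LEMMAS AND PROOFS =====

-- the dict lookup is the 'keep the last matching index' fold over enumerate
theorem pv_getD_foldl_insert (xs : List Int) (s : Int) (d : PySem.Dict Int Int) (v d0 : Int) :
    ((PySem.List.enumerate xs s).foldl (fun d p => d.insert p.2 p.1) d).getD v d0
      = (PySem.List.enumerate xs s).foldl (fun acc p => if p.2 = v then p.1 else acc) (d.getD v d0) := by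
  induction xs generalizing s d with
  | nil => simp [PySem.List.enumerate_nil]
  | cons x xs ih =>
    simp only [PySem.List.enumerate_cons, List.foldl_cons]
    rw [ih]
    rw [PySem.Dict.getD_insert]
    rcases eq_or_ne x v with hx | hx
    · simp [hx]
    · simp [hx, Ne.symm hx]

-- the evolving comparison value in A's inner fold never changes along the jump chain
theorem pv_fold_evolving_eq_fixed (chemin : List Int) (L : List Int) (cur v : Int)
    (h : PySem.List.pyGetD chemin cur 0 = v) :
    L.foldl (fun cur i => if PySem.List.pyGetD chemin i 0 = PySem.List.pyGetD chemin cur 0 then i else cur) cur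
      = L.foldl (fun acc i => if PySem.List.pyGetD chemin i 0 = v then i else acc) cur := by
  induction L generalizing cur with
  | nil => rfl
  | cons a L ih =>
    simp only [List.foldl_cons, h]
    by_cases ha : PySem.List.pyGetD chemin a 0 = v
    · simp only [if_pos ha]
      exact ih a ha
    · simp only [if_neg ha]
      exact ih cur h

-- the fixed fold restarted at any index c with chemin[c] = v gives the same result from any start
theorem pv_fold_fixed_restart (chemin : List Int) (c v a : Int)
    (hc0 : 0 ≤ c) (hcn : c < (chemin.length : Int))
    (hv : PySem.List.pyGetD chemin c 0 = v) :
    (PySem.List.pyRange 0 chemin.length 1).foldl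
        (fun acc i => if PySem.List.pyGetD chemin i 0 = v then i else acc) a
      = (PySem.List.pyRange (c + 1) chemin.length 1).foldl
          (fun acc i => if PySem.List.pyGetD chemin i 0 = v then i else acc) c := by
  rw [PySem.List.pyRange_one_append 0 (c + 1) (chemin.length : Int) (by omega) (by omega)]
  rw [List.foldl_append]
  congr 1
  rw [PySem.List.pyRange_one_succ_right (by omega)]
  rw [List.foldl_append]
  simp [hv]

-- a fold that only ever keeps the state or picks a list element lands in cur :: L
theorem pv_fold_mem (chemin : List Int) (L : List Int) (cur v : Int) :
    L.foldl (fun acc i => if PySem.List.pyGetD chemin i 0 = v then i else acc) cur ∈ cur :: L := by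
  induction L generalizing cur with
  | nil => simp
  | cons a L ih =>
    simp only [List.foldl_cons]
    by_cases ha : PySem.List.pyGetD chemin a 0 = v
    · simp only [if_pos ha]
      exact List.mem_cons_of_mem cur (ih a)
    · simp only [if_neg ha]
      rcases List.mem_cons.1 (ih cur) with h | h
      · simp [h]
      · simp [List.mem_cons, h]

-- KEY: A's inner scan from index c equals B's dict lookup of chemin[c]
theorem pv_inner_eq_dict (chemin : List Int) (c : Int)
    (hc0 : 0 ≤ c) (hcn : c < (chemin.length : Int)) :
    pvInnerA chemin c = (pvLastDict chemin).getD (PySem.List.pyGetD chemin c 0) 0 := by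
  set v := PySem.List.pyGetD chemin c 0 with hv
  unfold pvInnerA pvLastDict
  rw [pv_fold_evolving_eq_fixed chemin _ c v hv.symm]
  rw [pv_getD_foldl_insert]
  rw [PySem.List.enumerate_eq_map_pyRange (d := 0)]
  rw [List.foldl_map]
  simp only [PySem.List.len_eq]
  rw [pv_fold_fixed_restart chemin c v _ hc0 hcn hv.symm]

-- the inner fold's result is at least c (for nonnegativity of the next cursor)
theorem pv_inner_ge (chemin : List Int) (c : Int) : c ≤ pvInnerA chemin c := by
  unfold pvInnerA
  rw [pv_fold_evolving_eq_fixed chemin _ c (PySem.List.pyGetD chemin c 0) rfl]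
  rcases List.mem_cons.1 (pv_fold_mem chemin (PySem.List.pyRange (c + 1) chemin.length 1) c (PySem.List.pyGetD chemin c 0)) with h | h
  · omega
  · have := (PySem.List.mem_pyRange_one).1 h
    omega

-- both fuel-guarded loops evolve the same state
theorem pv_loops_eq (chemin : List Int) (fuel : Nat) (p : Int) (acc : List Int) (hp : 0 ≤ p) :
    pvLoopA chemin fuel p acc = pvLoopB chemin (pvLastDict chemin) fuel p acc := by
  induction fuel generalizing p acc with
  | zero => rfl
  | succ fuel ih =>
    simp only [pvLoopA, pvLoopB]
    by_cases h : p < (chemin.length : Int)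
    · simp only [if_pos h]
      have hjump : pvInnerA chemin (p + 1)
          = (if p + 1 < (chemin.length : Int)
              then (pvLastDict chemin).getD (PySem.List.pyGetD chemin (p + 1) 0) 0 else p + 1) := by
        by_cases h1 : p + 1 < (chemin.length : Int)
        · rw [if_pos h1]
          exact pv_inner_eq_dict chemin (p + 1) (by omega) h1
        · rw [if_neg h1]
          unfold pvInnerA
          rw [PySem.List.pyRange_one_eq_nil (by omega)]
          rfl
      rw [hjump]
      exact ih _ _ (le_trans (by omega : (0:Int) ≤ p + 1)
        (by rw [← hjump]; exact pv_inner_ge chemin (p + 1)))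
    · simp only [if_neg h]

-- ===== VERDICT (by name: the statement is the Claim_ definition above) =====
theorem stop_errance_spec : Claim_equal_stop_errance := by
  intro chemin _
  unfold Spec_stop_errance stop_errance stop_errance_alt
  exact pv_loops_eq chemin (chemin.length + 1) 0 [] le_rfl
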